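-- pv_equiv track=rewrite | github.com/KurozawaChiaki/HKUMScCompSc_Assignments | COMP7404/a2/p1.py | print_map
-- ===== SOURCE A (Python) =====
-- from typing import List, Tuple, Dict
--
-- def print_map(grid: List[List[str]], pacman: Tuple[int, int],
--               ghosts: List[Tuple[int, int]],
--               food: List[Tuple[int, int]]) -> str:
--     res: str = ""
--     for x, line in enumerate(grid):
--         out_line: str = ""
--         for y, ch in enumerate(line):
--             if (x, y) == ghosts[0]:
--                 out_line += "W"
--             elif (x, y) == pacman:
--                 out_line += "P"
--             elif (x, y) in food:
--                 out_line += '.'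
--             else:
--                 out_line += ch
--         res += (out_line + "\n")
--
--     return res
-- ===== SOURCE B (Python) =====
-- def print_map(grid, pacman, ghosts, food):
--     rows = [list(line) for line in grid]
--
--     def put(pos, mark):
--         x, y = pos
--         if 0 <= x < len(rows) and 0 <= y < len(rows[x]):
--             rows[x][y] = mark
--
--     # reverse-priority scatter: later writes overwrite earlier ones
--     for f in food:
--         put(f, '.')
--     put(pacman, 'P')
--     put(ghosts[0], 'W')
--
--     return "".join("".join(r) + "\n" for r in rows)
-- ===== Notes on version B (the rewrite author's own statement) =====
-- stated objective: alternative
-- what changed: B scatters overlays by writing '.', 'P', 'W' directly into a mutable copy of the grid in reverse-priority order and then joins the rows, instead of A's per-cell gather that tests ghost/pacman/food membership for every cell; the per-cell 'in food' scan disappears.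
-- outside the precondition, e.g. on print_map([], (0, 0), [], []): A returns '', B raises IndexError
import Mathlib
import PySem

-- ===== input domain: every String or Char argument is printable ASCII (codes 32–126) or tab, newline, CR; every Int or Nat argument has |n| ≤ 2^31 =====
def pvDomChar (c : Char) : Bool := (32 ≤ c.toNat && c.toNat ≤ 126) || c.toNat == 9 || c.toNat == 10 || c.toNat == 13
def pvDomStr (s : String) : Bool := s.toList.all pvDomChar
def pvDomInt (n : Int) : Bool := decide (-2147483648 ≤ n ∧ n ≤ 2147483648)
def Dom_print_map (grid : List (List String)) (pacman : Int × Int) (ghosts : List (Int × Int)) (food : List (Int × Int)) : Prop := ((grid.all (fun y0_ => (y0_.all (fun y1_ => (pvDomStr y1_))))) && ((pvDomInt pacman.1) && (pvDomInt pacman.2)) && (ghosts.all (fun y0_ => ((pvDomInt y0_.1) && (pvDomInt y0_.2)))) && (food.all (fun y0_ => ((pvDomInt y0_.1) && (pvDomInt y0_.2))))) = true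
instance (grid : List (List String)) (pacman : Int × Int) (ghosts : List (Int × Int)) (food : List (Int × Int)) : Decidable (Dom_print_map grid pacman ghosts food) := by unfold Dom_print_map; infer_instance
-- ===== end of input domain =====

-- B builds the picture by scattering: it writes the overlays ('.', then 'P', then 'W') directly
-- into a copy of the grid in reverse-priority order and joins the rows, instead of A's per-cell
-- gather that tests ghost/pacman/food for every cell (alternative decomposition, same result).

-- ===== PORT A =====
-- the per-cell branch chain of A, in A's branch order
def pvSel (g0 pm : Int × Int) (food : List (Int × Int)) (x y : Int) (ch : String) : String :=
  if (x, y) = g0 then "W"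
  else if (x, y) = pm then "P"
  else if (x, y) ∈ food then "."
  else ch

def print_map (grid : List (List String)) (pacman : Int × Int) (ghosts : List (Int × Int)) (food : List (Int × Int)) : String :=
  let g0 := ghosts.headD (0, 0)   -- ghosts[0]; Pre_ guarantees ghosts ≠ []
  (PySem.List.enumerate grid).foldl
    (fun res xl =>
      res ++ ((PySem.List.enumerate xl.2).foldl
        (fun out yc => out ++ pvSel g0 pacman food xl.1 yc.1 yc.2) "") ++ "\n")
    ""

-- ===== PORT B =====
-- write mark at pos into the grid copy, ignored when out of range (B's `put`)
def pvPut (g : List (List String)) (pos : Int × Int) (mark : String) : List (List String) :=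
  if 0 ≤ pos.1 ∧ pos.1 < (g.length : Int) ∧ 0 ≤ pos.2 ∧ pos.2 < ((g.getD pos.1.toNat []).length : Int) then
    g.set pos.1.toNat ((g.getD pos.1.toNat []).set pos.2.toNat mark)
  else g

-- "".join(r) (B folds the row's cells together)
def pvJoinRow (r : List String) : String := r.foldl (· ++ ·) ""

def print_map_alt (grid : List (List String)) (pacman : Int × Int) (ghosts : List (Int × Int)) (food : List (Int × Int)) : String :=
  let rows1 := food.foldl (fun g f => pvPut g f ".") grid
  let rows2 := pvPut rows1 pacman "P"
  let rows3 := pvPut rows2 (ghosts.headD (0, 0)) "W"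
  rows3.foldl (fun res r => res ++ pvJoinRow r ++ "\n") ""

-- ===== PRECONDITION & SPEC =====
-- Pre_ excludes ghosts = [], on which B unconditionally raises IndexError at ghosts[0]; A raises there too unless every grid cell loop is empty (e.g. grid = []), where A returns the newlines-only map.
def Pre_print_map (grid : List (List String)) (pacman : Int × Int) (ghosts : List (Int × Int)) (food : List (Int × Int)) : Prop := ghosts ≠ []
instance (grid : List (List String)) (pacman : Int × Int) (ghosts : List (Int × Int)) (food : List (Int × Int)) : Decidable (Pre_print_map grid pacman ghosts food) := by unfold Pre_print_map; infer_instance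
def pvWitness_print_map : List (List String) × (Int × Int) × (List (Int × Int)) × (List (Int × Int)) :=
  ([["#", " ", " "], [" ", " ", "#"]], (0, 1), [(1, 1)], [(0, 2), (1, 0)])

def Spec_print_map (grid : List (List String)) (pacman : Int × Int) (ghosts : List (Int × Int)) (food : List (Int × Int)) (out : String) : Prop := out = print_map_alt grid pacman ghosts food
instance (grid : List (List String)) (pacman : Int × Int) (ghosts : List (Int × Int)) (food : List (Int × Int)) (out : String) : Decidable (Spec_print_map grid pacman ghosts food out) := by unfold Spec_print_map; infer_instance

-- ===== CLAIM (what is proved, stated in full; the proofs are below) =====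
def Claim_equal_print_map : Prop := ∀ (grid : List (List String)) (pacman : Int × Int) (ghosts : List (Int × Int)) (food : List (Int × Int)), Dom_print_map grid pacman ghosts food → Pre_print_map grid pacman ghosts food → Spec_print_map grid pacman ghosts food (print_map grid pacman ghosts food)

-- ===== LEMMAS AND PROOFS =====

theorem pvPut_length (g : List (List String)) (p : Int × Int) (m : String) :
    (pvPut g p m).length = g.length := by
  unfold pvPut; split <;> simp

theorem pvPut_row_length (g : List (List String)) (p : Int × Int) (m : String) (i : Nat) :
    ((pvPut g p m).getD i []).length = (g.getD i []).length := by
  unfold pvPut; split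
  case isTrue h =>
    by_cases hik : p.1.toNat = i
    · subst hik
      have hlt : p.1.toNat < g.length := by omega
      simp [List.getD, hlt]
    · simp [List.getD, List.getElem?_set_ne hik]
  case isFalse => rfl

theorem pvPut_cell (g : List (List String)) (p : Int × Int) (m : String) (i j : Nat)
    (hi : i < g.length) (hj : j < (g.getD i []).length) :
    ((pvPut g p m).getD i []).getD j "" =
      if p = ((i : Int), (j : Int)) then m else (g.getD i []).getD j "" := by
  unfold pvPut
  by_cases hp : p = ((i:Int), (j:Int))
  · have e1 : p.1 = (i:Int) := by rw [hp]
    have e2 : p.2 = (j:Int) := by rw [hp]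
    have ti : p.1.toNat = i := by omega
    have hg : 0 ≤ p.1 ∧ p.1 < (g.length:Int) ∧ 0 ≤ p.2 ∧ p.2 < ((g.getD p.1.toNat []).length : Int) := by
      rw [ti]; exact ⟨by omega, by omega, by omega, by omega⟩
    rw [if_pos hg, if_pos hp]
    have tj : p.2.toNat = j := by omega
    rw [ti, tj]
    simp [List.getD, hi] at hj
    simp [List.getD, hi, hj]
  · rw [if_neg hp]
    split
    next h =>
      by_cases hik : p.1.toNat = i
      · have e1 : p.1 = (i:Int) := by omega
        have hjk : p.2.toNat ≠ j := by
          intro hh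
          apply hp
          have e2 : p.2 = (j:Int) := by omega
          obtain ⟨a, b⟩ := p
          simp at e1 e2
          rw [e1, e2]
        subst hik
        have hlt : p.1.toNat < g.length := by omega
        simp [List.getD, hlt, List.getElem?_set_ne hjk]
      · simp [List.getD, List.getElem?_set_ne hik]
    next h => rfl

theorem foldl_put_length (food : List (Int × Int)) (g : List (List String)) :
    (food.foldl (fun g f => pvPut g f ".") g).length = g.length := by
  induction food generalizing g with
  | nil => rfl
  | cons f rest ih => rw [List.foldl_cons, ih, pvPut_length]

theorem foldl_put_row_length (food : List (Int × Int)) (g : List (List String)) (i : Nat) :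
    ((food.foldl (fun g f => pvPut g f ".") g).getD i []).length = (g.getD i []).length := by
  induction food generalizing g with
  | nil => rfl
  | cons f rest ih => rw [List.foldl_cons, ih, pvPut_row_length]

theorem foldl_put_cell (food : List (Int × Int)) (g : List (List String)) (i j : Nat)
    (hi : i < g.length) (hj : j < (g.getD i []).length) :
    ((food.foldl (fun g f => pvPut g f ".") g).getD i []).getD j "" =
      if ((i : Int), (j : Int)) ∈ food then "." else (g.getD i []).getD j "" := by
  induction food generalizing g with
  | nil => simp
  | cons f rest ih =>
    rw [List.foldl_cons,
        ih (pvPut g f ".") (by rw [pvPut_length]; exact hi)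
           (by rw [pvPut_row_length]; exact hj),
        pvPut_cell g f "." i j hi hj]
    by_cases h1 : ((i:Int),(j:Int)) ∈ rest <;> by_cases h2 : f = ((i:Int),(j:Int)) <;>
      simp [h1, h2, List.mem_cons, eq_comm]

theorem pvJoinRow_acc (l : List String) (a : String) :
    l.foldl (· ++ ·) a = a ++ pvJoinRow l := by
  induction l generalizing a with
  | nil => simp [pvJoinRow]
  | cons r rs ih =>
    simp only [List.foldl_cons]
    rw [ih (a ++ r)]
    conv_rhs => rw [pvJoinRow]
    simp only [List.foldl_cons]
    rw [ih ("" ++ r)]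
    simp [String.append_assoc]

theorem pvJoinRow_cons (r : String) (rs : List String) :
    pvJoinRow (r :: rs) = r ++ pvJoinRow rs := by
  rw [pvJoinRow]
  simp only [List.foldl_cons]
  rw [pvJoinRow_acc]
  simp

theorem inner_eq (g0 pm : Int × Int) (food : List (Int × Int)) :
    ∀ (line row : List String) (x y : Int) (acc : String),
      row.length = line.length →
      (∀ j : Nat, j < line.length →
        row.getD j "" = pvSel g0 pm food x (y + (j : Int)) (line.getD j "")) →
      (PySem.List.enumerate line y).foldl
        (fun out yc => out ++ pvSel g0 pm food x yc.1 yc.2) acc = acc ++ pvJoinRow row := by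
  intro line
  induction line with
  | nil =>
    intro row x y acc hlen hcell
    rw [List.length_nil, List.length_eq_zero_iff] at hlen
    subst hlen
    simp [PySem.List.enumerate_nil, pvJoinRow]
  | cons ch rest ih =>
    intro row x y acc hlen hcell
    cases row with
    | nil => simp at hlen
    | cons r0 rrest =>
      have h0 := hcell 0 (by simp)
      simp at h0
      rw [PySem.List.enumerate_cons, List.foldl_cons,
          ih rrest x (y + 1) (acc ++ pvSel g0 pm food x y ch) (by simpa using hlen)
            (by
              intro j hjl
              have := hcell (j + 1) (by simpa using Nat.succ_lt_succ hjl)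
              rw [show y + 1 + (j:Int) = y + ((j:Int) + 1) by ring]; simpa [Nat.cast_add] using this),
          pvJoinRow_cons, h0]
      simp [String.append_assoc]


theorem outer_eq (g0 pm : Int × Int) (food : List (Int × Int)) :
    ∀ (grid rows : List (List String)) (x : Int) (acc : String),
      rows.length = grid.length →
      (∀ k : Nat, k < grid.length →
        (rows.getD k []).length = (grid.getD k []).length ∧
        ∀ j : Nat, j < (grid.getD k []).length →
          (rows.getD k []).getD j "" =
            pvSel g0 pm food (x + (k : Int)) (j : Int) ((grid.getD k []).getD j "")) →
      (PySem.List.enumerate grid x).foldl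
        (fun res xl =>
          res ++ ((PySem.List.enumerate xl.2).foldl
            (fun out yc => out ++ pvSel g0 pm food xl.1 yc.1 yc.2) "") ++ "\n") acc
      = rows.foldl (fun res r => res ++ pvJoinRow r ++ "\n") acc := by
  intro grid
  induction grid with
  | nil =>
    intro rows x acc hlen hrow
    rw [List.length_nil, List.length_eq_zero_iff] at hlen
    subst hlen
    simp [PySem.List.enumerate_nil]
  | cons line grest ih =>
    intro rows x acc hlen hrow
    cases rows with
    | nil => simp at hlen
    | cons r0 rrest =>
      have h0 := hrow 0 (by simp)
      simp only [List.getD_cons_zero, Nat.cast_zero, add_zero] at h0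
      rw [PySem.List.enumerate_cons, List.foldl_cons, List.foldl_cons,
          inner_eq g0 pm food line r0 x 0 "" h0.1 (by
            intro j hj
            simpa using h0.2 j hj)]
      rw [ih rrest (x + 1) (acc ++ ("" ++ pvJoinRow r0) ++ "\n") (by simpa using hlen) (by
        intro k hk
        have := hrow (k + 1) (by simpa using Nat.succ_lt_succ hk)
        simp only [List.getD_cons_succ] at this
        refine ⟨this.1, ?_⟩
        intro j hj
        rw [show x + 1 + (k:Int) = x + ((k:Int) + 1) by ring]
        simpa [Nat.cast_add] using this.2 j hj)]
      simp

theorem rows3_cell (grid : List (List String)) (pm g0 : Int × Int) (food : List (Int × Int))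
    (k j : Nat) (hk : k < grid.length) (hj : j < (grid.getD k []).length) :
    (((pvPut (pvPut (food.foldl (fun g f => pvPut g f ".") grid) pm "P") g0 "W").getD k []).getD j "")
      = pvSel g0 pm food (k : Int) (j : Int) ((grid.getD k []).getD j "") := by
  rw [pvPut_cell _ g0 "W" k j
        (by rw [pvPut_length, foldl_put_length]; exact hk)
        (by rw [pvPut_row_length, foldl_put_row_length]; exact hj),
      pvPut_cell _ pm "P" k j
        (by rw [foldl_put_length]; exact hk)
        (by rw [foldl_put_row_length]; exact hj),
      foldl_put_cell food grid k j hk hj]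
  by_cases hA : g0 = ((k:Int), (j:Int)) <;> by_cases hB : pm = ((k:Int), (j:Int)) <;>
    simp [pvSel, hA, hB, eq_comm]

-- ===== VERDICT (by name: the statement is the Claim_ definition above) =====
theorem print_map_spec : Claim_equal_print_map := by
  intro grid pacman ghosts food _ _
  unfold Spec_print_map print_map print_map_alt
  rw [outer_eq (ghosts.headD (0, 0)) pacman food grid
        (pvPut (pvPut (food.foldl (fun g f => pvPut g f ".") grid) pacman "P") (ghosts.headD (0, 0)) "W")
        0 ""
        (by rw [pvPut_length, pvPut_length, foldl_put_length])
        (by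
          intro k hk
          refine ⟨by rw [pvPut_row_length, pvPut_row_length, foldl_put_row_length], ?_⟩
          intro j hj
          rw [rows3_cell grid pacman (ghosts.headD (0, 0)) food k j hk hj, zero_add])]
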